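-- pv_equiv track=rewrite | github.com/mglevitt/DSC20 | DSC20/lab06.py | question5
-- ===== SOURCE A (Python) =====
-- def question5(number):
--     """
--     >>> question5(1181)
--     4
--     >>> question5(181)
--     2
--     >>> question5(11911)
--     6
--     >>> question5(111111)
--     11
--     """
--     if number>0:
--         if number%100==11:
--             return 2+question5(number//10)
--         elif number%10==1:
--             return 1+question5(number//10)
--         else:
--             return question5(number//10)
--     else:
--         return 0
-- ===== SOURCE B (Python) =====
-- def question5(number):
--     if number <= 0:
--         return 0
--     digits = []
--     n = number
--     while n > 0:
--         digits.append(n % 10)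
--         n //= 10
--     ones = digits.count(1)
--     pairs = sum(1 for a, b in zip(digits, digits[1:]) if a == 1 and b == 1)
--     return ones + pairs
-- ===== Notes on version B (the rewrite author's own statement) =====
-- stated objective: simpler
-- what changed: Replaced A's single recursive pass, which interleaves the one-digit count and the adjacent-pair count via modular tests while dividing down, with: extract the digit list once, then sum two separate passes (a count of digits equal to one, plus a zip-based count of adjacent pairs of ones).
import Mathlib
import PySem

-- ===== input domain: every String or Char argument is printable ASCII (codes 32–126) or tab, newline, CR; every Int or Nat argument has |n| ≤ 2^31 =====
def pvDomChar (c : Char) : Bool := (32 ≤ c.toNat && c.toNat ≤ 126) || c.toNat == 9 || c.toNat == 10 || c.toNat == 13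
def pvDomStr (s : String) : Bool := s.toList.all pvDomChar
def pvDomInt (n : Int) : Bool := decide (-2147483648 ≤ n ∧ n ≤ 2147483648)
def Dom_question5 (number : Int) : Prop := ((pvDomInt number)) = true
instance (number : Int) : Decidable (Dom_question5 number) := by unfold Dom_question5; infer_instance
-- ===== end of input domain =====

-- B replaces A's single recursive mod/div pass by extracting the digit list once and
-- summing two separate passes (count of 1-digits + count of adjacent (1,1) pairs); objective: simpler decomposition.


-- termination helper for the div-by-10 recursions
theorem pvQ5Dec (n : Int) (h : 0 < n) : (PySem.Int.floordiv n 10).toNat < n.toNat := by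
  rw [PySem.Int.floordiv_eq_ediv_of_pos (by norm_num)]
  omega

-- ===== PORT A =====
def question5 (number : Int) : Int :=
  if 0 < number then
    if PySem.Int.mod number 100 = 11 then 2 + question5 (PySem.Int.floordiv number 10)
    else if PySem.Int.mod number 10 = 1 then 1 + question5 (PySem.Int.floordiv number 10)
    else question5 (PySem.Int.floordiv number 10)
  else 0
termination_by number.toNat
decreasing_by all_goals exact pvQ5Dec number ‹_›

-- ===== PORT B =====
-- the while loop of Source B: append n % 10, n //= 10, while n > 0
def q5DigitsLoop (n : Int) (acc : List Int) : List Int :=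
  if 0 < n then q5DigitsLoop (PySem.Int.floordiv n 10) (acc ++ [PySem.Int.mod n 10]) else acc
termination_by n.toNat
decreasing_by exact pvQ5Dec n ‹_›

def question5_alt (number : Int) : Int :=
  if number ≤ 0 then 0
  else
    let ds := q5DigitsLoop number []
    let ones : Int := (PySem.List.count ds 1 : Int)
    let pairs : Int := ((ds.zip (ds.drop 1)).countP (fun p => p.1 == 1 && p.2 == 1) : Int)
    ones + pairs

-- ===== PRECONDITION & SPEC =====
def Spec_question5 (number : Int) (out : Int) : Prop := out = question5_alt number
instance (number : Int) (out : Int) : Decidable (Spec_question5 number out) := by unfold Spec_question5; infer_instance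

-- ===== CLAIM (what is proved, stated in full; the proofs are below) =====
def Claim_equal_question5 : Prop := ∀ (number : Int), Dom_question5 number → Spec_question5 number (question5 number)

-- ===== LEMMAS AND PROOFS =====

-- least-significant-first digit list, for reasoning
def pvDigs (n : Int) : List Int :=
  if 0 < n then n % 10 :: pvDigs (n / 10) else []
termination_by n.toNat
decreasing_by omega

theorem pvDigs_pos (n : Int) (h : 0 < n) : pvDigs n = n % 10 :: pvDigs (n / 10) := by
  rw [pvDigs]; exact if_pos h

theorem pvDigs_nonpos (n : Int) (h : ¬ 0 < n) : pvDigs n = [] := by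
  rw [pvDigs]; exact if_neg h

theorem q5DigitsLoop_eq : ∀ (m : Nat) (n : Int), n.toNat ≤ m → ∀ acc, q5DigitsLoop n acc = acc ++ pvDigs n := by
  intro m
  induction m with
  | zero =>
    intro n h acc
    have h0 : ¬ 0 < n := by omega
    rw [q5DigitsLoop, pvDigs_nonpos n h0]
    simp [h0]
  | succ m ih =>
    intro n h acc
    by_cases h0 : 0 < n
    · rw [q5DigitsLoop]
      simp only [h0, if_pos]
      rw [ih (PySem.Int.floordiv n 10) (by have := pvQ5Dec n h0; omega), pvDigs_pos n h0]
      rw [PySem.Int.floordiv_eq_ediv_of_pos (by norm_num), PySem.Int.mod_eq_emod_of_pos (by norm_num)]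
      simp
    · rw [q5DigitsLoop, pvDigs_nonpos n h0]
      simp [h0]

def pvPairs (l : List Int) : Int :=
  ((l.zip (l.drop 1)).countP (fun p => p.1 == 1 && p.2 == 1) : Int)

theorem question5_eq_digs : ∀ (m : Nat) (n : Int), n.toNat ≤ m →
    question5 n = (PySem.List.count (pvDigs n) 1 : Int) + pvPairs (pvDigs n) := by
  intro m
  induction m with
  | zero =>
    intro n h
    have h0 : ¬ 0 < n := by omega
    rw [question5, pvDigs_nonpos n h0]
    simp [h0, pvPairs, PySem.List.count_eq]
  | succ m ih =>
    intro n h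
    by_cases h0 : 0 < n
    · have e100 : PySem.Int.mod n 100 = n % 100 := PySem.Int.mod_eq_emod_of_pos (by norm_num)
      have e10 : PySem.Int.mod n 10 = n % 10 := PySem.Int.mod_eq_emod_of_pos (by norm_num)
      have ed : PySem.Int.floordiv n 10 = n / 10 := PySem.Int.floordiv_eq_ediv_of_pos (by norm_num)
      have hd : (n / 10).toNat ≤ m := by have := pvQ5Dec n h0; rw [ed] at this; omega
      have ihn := ih (n / 10) hd
      rw [question5]
      simp only [h0, if_pos, e100, e10, ed]
      rw [pvDigs_pos n h0, ihn]
      by_cases hq : 0 < n / 10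
      · rw [pvDigs_pos (n / 10) hq]
        simp only [PySem.List.count_eq, pvPairs, List.count_cons, List.drop_succ_cons,
          List.drop_zero, List.zip_cons_cons, List.countP_cons, beq_iff_eq,
          Bool.and_eq_true]
        push_cast
        split_ifs <;> omega
      · rw [pvDigs_nonpos (n / 10) hq]
        simp only [PySem.List.count_eq, pvPairs, List.count_cons, List.count_nil,
          List.drop_succ_cons, List.drop_nil, List.zip_nil_right, List.countP_nil,
          beq_iff_eq]
        push_cast
        split_ifs <;> omega
    · rw [question5, pvDigs_nonpos n h0]
      simp [h0, pvPairs, PySem.List.count_eq]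

-- ===== VERDICT (by name: the statement is the Claim_ definition above) =====
theorem question5_spec : Claim_equal_question5 := by
  intro number _
  unfold Spec_question5 question5_alt
  by_cases h : number ≤ 0
  · rw [question5]
    simp [h, show ¬ 0 < number by omega]
  · simp only [h, if_false]
    rw [q5DigitsLoop_eq number.toNat number le_rfl []]
    simp only [List.nil_append]
    rw [question5_eq_digs number.toNat number le_rfl]
    rfl
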